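-- pv_equiv track=rewrite | github.com/TaeyanG4/Baekjoon | 백준/Bronze/15734. 명장 남정훈/명장 남정훈.py | solution
-- ===== SOURCE A (Python) =====
-- def solution(left, right, both):
--     while True:
--         if left == right:
--             return 2 * (left + both//2)
--
--         if left < right:
--             left += 1
--             both -= 1
--         elif left > right:
--             right += 1
--             both -= 1
--
--         if both == 0:
--             return min(left, right) * 2
-- ===== SOURCE B (Python) =====
-- def solution(left, right, both):
--     d = abs(left - right)
--     if 0 < both < d:
--         return 2 * (min(left, right) + both)
--     return 2 * (max(left, right) + (both - d) // 2)
-- ===== Notes on version B (the rewrite author's own statement) =====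
-- stated objective: faster
-- what changed: Replaced A's one-step-at-a-time balancing loop with a closed-form O(1) formula comparing both to the gap |left-right|.
import Mathlib
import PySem

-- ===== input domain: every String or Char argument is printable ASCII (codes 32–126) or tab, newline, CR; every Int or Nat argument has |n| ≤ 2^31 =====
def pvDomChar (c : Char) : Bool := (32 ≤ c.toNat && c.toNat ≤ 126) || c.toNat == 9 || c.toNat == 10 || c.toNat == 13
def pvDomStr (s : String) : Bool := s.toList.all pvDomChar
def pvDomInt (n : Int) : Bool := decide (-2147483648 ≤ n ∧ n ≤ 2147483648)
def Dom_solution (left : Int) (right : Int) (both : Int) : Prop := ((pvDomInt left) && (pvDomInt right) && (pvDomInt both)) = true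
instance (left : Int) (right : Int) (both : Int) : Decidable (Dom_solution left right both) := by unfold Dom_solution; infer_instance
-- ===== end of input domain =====

-- B replaces A's step-by-step balancing loop with a closed-form O(1) arithmetic formula (objective: faster).

-- ===== PORT A =====
-- literal transliteration of A's while-loop as a recursion; gap |left-right| shrinks each iteration
def solution (left : Int) (right : Int) (both : Int) : Int :=
  if left = right then 2 * (left + PySem.Int.floordiv both 2)
  else
    let l := if left < right then left + 1 else left
    let r := if left < right then right else right + 1
    let b := both - 1
    if b = 0 then (min l r) * 2 else solution l r b
termination_by (left - right).natAbs
decreasing_by split_ifs <;> omega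

-- ===== PORT B =====
def solution_alt (left : Int) (right : Int) (both : Int) : Int :=
  let d : Int := |left - right|
  if 0 < both ∧ both < d then 2 * (min left right + both)
  else 2 * (max left right + PySem.Int.floordiv (both - d) 2)

-- ===== PRECONDITION & SPEC =====
def Spec_solution (left : Int) (right : Int) (both : Int) (out : Int) : Prop := out = solution_alt left right both
instance (left : Int) (right : Int) (both : Int) (out : Int) : Decidable (Spec_solution left right both out) := by unfold Spec_solution; infer_instance

-- ===== CLAIM (what is proved, stated in full; the proofs are below) =====
def Claim_equal_solution : Prop := ∀ (left : Int) (right : Int) (both : Int), Dom_solution left right both → Spec_solution left right both (solution left right both)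

-- ===== LEMMAS AND PROOFS =====

theorem solution_eq_alt : ∀ (n : ℕ) (left right both : Int), (left - right).natAbs = n →
    solution left right both = solution_alt left right both := by
  intro n
  induction n using Nat.strong_induction_on with
  | _ n ih =>
    intro l r b hn
    rw [solution.eq_def]
    by_cases h : l = r
    · subst h
      rw [if_pos rfl]
      simp only [solution_alt]
      rw [show |l - l| = (0 : Int) by simp, sub_zero, max_self,
        if_neg (show ¬((0:Int) < b ∧ b < 0) by omega)]
    · rw [if_neg h]
      by_cases hb : b - 1 = 0
      · -- both hits 0 this step
        rw [if_pos hb]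
        have hb1 : b = 1 := by omega
        subst hb1
        simp only [solution_alt]
        by_cases hlr : l < r
        · simp only [if_pos hlr]
          have ha : |l - r| = r - l := by
            rcases abs_cases (l - r) with ⟨h1, h2⟩ | ⟨h1, h2⟩ <;> omega
          rw [ha]
          by_cases hd : (1 : Int) < r - l
          · rw [if_pos ⟨one_pos, hd⟩]
            have h1 : min (l + 1) r = l + 1 := by omega
            have h2 : min l r = l := by omega
            rw [h1, h2]; ring
          · rw [if_neg (by omega)]
            have h0 : (1 : Int) - (r - l) = 0 := by omega
            rw [h0, show PySem.Int.floordiv 0 2 = 0 from by decide]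
            have h1 : min (l + 1) r = r := by omega
            have h2 : max l r = r := by omega
            rw [h1, h2]; ring
        · simp only [if_neg hlr]
          have ha : |l - r| = l - r := by
            rcases abs_cases (l - r) with ⟨h1, h2⟩ | ⟨h1, h2⟩ <;> omega
          rw [ha]
          by_cases hd : (1 : Int) < l - r
          · rw [if_pos ⟨one_pos, hd⟩]
            have h1 : min l (r + 1) = r + 1 := by omega
            have h2 : min l r = r := by omega
            rw [h1, h2]; ring
          · rw [if_neg (by omega)]
            have h0 : (1 : Int) - (l - r) = 0 := by omega
            rw [h0, show PySem.Int.floordiv 0 2 = 0 from by decide]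
            have h1 : min l (r + 1) = l := by omega
            have h2 : max l r = l := by omega
            rw [h1, h2]; ring
      · rw [if_neg hb]
        -- recursive step: apply IH, then show alt is invariant under one step
        by_cases hlr : l < r
        · simp only [if_pos hlr]
          have hlt : ((l + 1) - r).natAbs < n := by omega
          rw [ih _ hlt (l + 1) r (b - 1) rfl]
          simp only [solution_alt]
          have ha1 : |l + 1 - r| = r - l - 1 := by
            rcases abs_cases (l + 1 - r) with ⟨h1, h2⟩ | ⟨h1, h2⟩ <;> omega
          have ha2 : |l - r| = r - l := by
            rcases abs_cases (l - r) with ⟨h1, h2⟩ | ⟨h1, h2⟩ <;> omega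
          rw [ha1, ha2]
          have hcond : (0 < b - 1 ∧ b - 1 < r - l - 1) ↔ (0 < b ∧ b < r - l) := by omega
          by_cases hc : 0 < b ∧ b < r - l
          · rw [if_pos (hcond.mpr hc), if_pos hc]
            have h1 : min (l + 1) r = l + 1 := by omega
            have h2 : min l r = l := by omega
            rw [h1, h2]; ring
          · rw [if_neg (fun hx => hc (hcond.mp hx)), if_neg hc]
            have h1 : max (l + 1) r = r := by omega
            have h2 : max l r = r := by omega
            have h3 : b - 1 - (r - l - 1) = b - (r - l) := by ring
            rw [h1, h2, h3]
        · simp only [if_neg hlr]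
          have hlt : (l - (r + 1)).natAbs < n := by omega
          rw [ih _ hlt l (r + 1) (b - 1) rfl]
          simp only [solution_alt]
          have ha1 : |l - (r + 1)| = l - r - 1 := by
            rcases abs_cases (l - (r + 1)) with ⟨h1, h2⟩ | ⟨h1, h2⟩ <;> omega
          have ha2 : |l - r| = l - r := by
            rcases abs_cases (l - r) with ⟨h1, h2⟩ | ⟨h1, h2⟩ <;> omega
          rw [ha1, ha2]
          have hcond : (0 < b - 1 ∧ b - 1 < l - r - 1) ↔ (0 < b ∧ b < l - r) := by omega
          by_cases hc : 0 < b ∧ b < l - r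
          · rw [if_pos (hcond.mpr hc), if_pos hc]
            have h1 : min l (r + 1) = r + 1 := by omega
            have h2 : min l r = r := by omega
            rw [h1, h2]; ring
          · rw [if_neg (fun hx => hc (hcond.mp hx)), if_neg hc]
            have h1 : max l (r + 1) = l := by omega
            have h2 : max l r = l := by omega
            have h3 : b - 1 - (l - r - 1) = b - (l - r) := by ring
            rw [h1, h2, h3]

-- ===== VERDICT (by name: the statement is the Claim_ definition above) =====
theorem solution_spec : Claim_equal_solution := by
  intro l r b _
  unfold Spec_solution
  exact solution_eq_alt _ l r b rfl
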